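-- pv_equiv track=rewrite | github.com/spack/spack-it | generate/util.py | extract_distilled_cmake
-- ===== SOURCE A (Python) =====
-- def extract_distilled_cmake(distilled):
--     # leverages cmake_distilled to extract the detected variants and dependencies...
--     detected_dependencies = []
--     detected_variants = []
--     in_summary = False
--     # it's probably more performant to expect that they would only be on the bottom three lines
--     # but don't want to run into parsing issues yet...
--     for line in distilled.splitlines():
--         if line.strip() == "SUMMARY":
--             in_summary = True
--             continue
--         if in_summary:
--             tokens = line.strip().split()
--             if not tokens:
--                 continue
--             if tokens[0] == "variants":
--                 detected_variants = tokens[1:]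
--             elif tokens[0] == "dependencies":
--                 detected_dependencies = tokens[1:]
--
--     return detected_dependencies, detected_variants
-- ===== SOURCE B (Python) =====
-- def extract_distilled_cmake(distilled):
--     # Locate the first SUMMARY line, then search BACKWARDS from the end for the
--     # last "dependencies" / "variants" line after it (early exit, no accumulator).
--     lines = distilled.splitlines()
--     for i, l in enumerate(lines):
--         if l.strip() == "SUMMARY":
--             break
--     else:
--         return [], []
--     tail = lines[i + 1:]
--
--     def last_tokens(key):
--         for line in reversed(tail):
--             toks = line.strip().split()
--             if toks and toks[0] == key:
--                 return toks[1:]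
--         return []
--
--     return last_tokens("dependencies"), last_tokens("variants")
-- ===== Notes on version B (the rewrite author's own statement) =====
-- stated objective: alternative
-- what changed: Replaces A's forward single-pass state machine (in_summary flag plus two mutated accumulators) by a search-based algorithm: find the first SUMMARY line, then run two independent backward scans over the lines after it, each returning the tokens of the first 'dependencies'/'variants' line met from the end (last-wins becomes first-match-in-reverse with early exit), with no accumulated state at all.
import Mathlib
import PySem

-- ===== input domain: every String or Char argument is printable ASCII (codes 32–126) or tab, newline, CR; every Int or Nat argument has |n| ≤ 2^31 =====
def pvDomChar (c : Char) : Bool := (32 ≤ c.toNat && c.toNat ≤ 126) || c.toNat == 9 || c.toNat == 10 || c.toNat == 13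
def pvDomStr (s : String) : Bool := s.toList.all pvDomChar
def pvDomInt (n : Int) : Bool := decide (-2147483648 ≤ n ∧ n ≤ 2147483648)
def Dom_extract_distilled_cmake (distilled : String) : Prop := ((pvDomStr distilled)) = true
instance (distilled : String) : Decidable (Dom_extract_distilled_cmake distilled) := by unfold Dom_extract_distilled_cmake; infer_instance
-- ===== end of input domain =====

-- B replaces A's forward state machine by: find the SUMMARY line, then two backward early-exit searches for the last 'dependencies'/'variants' line; same cost, different algorithm.

-- ===== PORT A =====
-- loop body of A: state = (detected_dependencies, detected_variants, in_summary)
def pvStepA (st : List String × List String × Bool) (line : String) : List String × List String × Bool :=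
  if PySem.Str.strip line = "SUMMARY" then (st.1, st.2.1, true)
  else if st.2.2 then
    match PySem.Str.split₀ (PySem.Str.strip line) with
    | [] => st
    | t :: rest =>
      if t = "variants" then (st.1, rest, st.2.2)
      else if t = "dependencies" then (rest, st.2.1, st.2.2)
      else st
  else st

def extract_distilled_cmake (distilled : String) : List String × List String :=
  let st := (PySem.Str.splitlines distilled).foldl pvStepA ([], [], false)
  (st.1, st.2.1)

-- ===== PORT B =====
-- last_tokens: first match scanning the (already reversed) list head-first, early exit
def pvLastTokens (key : String) : List String → List String
  | [] => []
  | l :: rest =>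
    match PySem.Str.split₀ (PySem.Str.strip l) with
    | t :: ts => if t = key then ts else pvLastTokens key rest
    | [] => pvLastTokens key rest

def extract_distilled_cmake_alt (distilled : String) : List String × List String :=
  let lines := PySem.Str.splitlines distilled
  match lines.findIdx? (fun l => PySem.Str.strip l == "SUMMARY") with
  | none => ([], [])
  | some i =>
    let tail := (lines.drop (i + 1)).reverse
    (pvLastTokens "dependencies" tail, pvLastTokens "variants" tail)

-- ===== PRECONDITION & SPEC =====
def Spec_extract_distilled_cmake (distilled : String) (out : List String × List String) : Prop := out = extract_distilled_cmake_alt distilled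
instance (distilled : String) (out : List String × List String) : Decidable (Spec_extract_distilled_cmake distilled out) := by unfold Spec_extract_distilled_cmake; infer_instance

-- ===== CLAIM =====
def Claim_equal_extract_distilled_cmake : Prop := ∀ (distilled : String), Dom_extract_distilled_cmake distilled → Spec_extract_distilled_cmake distilled (extract_distilled_cmake distilled)

-- ===== LEMMAS AND PROOFS =====

-- option-valued variant of pvLastTokens used only inside the proof
def pvLastTokens? (key : String) : List String → Option (List String)
  | [] => none
  | l :: rest =>
    match PySem.Str.split₀ (PySem.Str.strip l) with
    | t :: ts => if t = key then some ts else pvLastTokens? key rest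
    | [] => pvLastTokens? key rest

lemma pvLastTokens_eq_opt (key : String) (xs : List String) :
    pvLastTokens key xs = (pvLastTokens? key xs).getD [] := by
  induction xs with
  | nil => rfl
  | cons l rest ih =>
    simp only [pvLastTokens, pvLastTokens?]
    cases hs : PySem.Str.split₀ (PySem.Str.strip l) with
    | nil => exact ih
    | cons t ts =>
      by_cases h : t = key
      · simp [h]
      · simp [h, ih]

lemma pvLastTokens?_append (key : String) (xs ys : List String) :
    pvLastTokens? key (xs ++ ys)
      = ((pvLastTokens? key xs).or (pvLastTokens? key ys)) := by
  induction xs with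
  | nil => simp [pvLastTokens?]
  | cons l rest ih =>
    simp only [List.cons_append, pvLastTokens?]
    cases hs : PySem.Str.split₀ (PySem.Str.strip l) with
    | nil => exact ih
    | cons t ts =>
      by_cases h : t = key
      · simp [h]
      · simp [h, ih]

-- A's fold once the flag is set computes B's two backward searches (over the reversed list)
lemma foldA_true_eq_searches (lines : List String) (d v : List String) :
    lines.foldl pvStepA (d, v, true)
      = ((pvLastTokens? "dependencies" lines.reverse).getD d,
         (pvLastTokens? "variants" lines.reverse).getD v, true) := by
  induction lines generalizing d v with
  | nil => rfl
  | cons l rest ih =>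
    simp only [List.foldl, List.reverse_cons, pvLastTokens?_append]
    have hline : ∀ (key : String) (d0 : List String),
        (((pvLastTokens? key rest.reverse).or (pvLastTokens? key [l])).getD d0)
          = (pvLastTokens? key rest.reverse).getD ((pvLastTokens? key [l]).getD d0) := by
      intro key d0
      cases pvLastTokens? key rest.reverse <;> simp [Option.or]
    rw [hline, hline]
    by_cases hsum : PySem.Str.strip l = "SUMMARY"
    · have hs : PySem.Str.split₀ (PySem.Str.strip l) = ["SUMMARY"] := by rw [hsum]; decide
      have h1 : pvStepA (d, v, true) l = (d, v, true) := by simp [pvStepA, hsum]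
      have h2 : ∀ key ∈ ["dependencies", "variants"], pvLastTokens? (key : String) [l] = none := by
        intro key hk
        fin_cases hk <;> simp [pvLastTokens?, hs]
      rw [h1, ih]
      simp [h2 "dependencies" (by simp), h2 "variants" (by simp)]
    · cases hs : PySem.Str.split₀ (PySem.Str.strip l) with
      | nil =>
        have h1 : pvStepA (d, v, true) l = (d, v, true) := by simp [pvStepA, hsum, hs]
        rw [h1, ih]
        simp [pvLastTokens?, hs]
      | cons t ts =>
        by_cases hv : t = "variants"
        · have h1 : pvStepA (d, v, true) l = (d, ts, true) := by simp [pvStepA, hsum, hs, hv]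
          rw [h1, ih]
          simp [pvLastTokens?, hs, hv]
        · by_cases hd : t = "dependencies"
          · have h1 : pvStepA (d, v, true) l = (ts, v, true) := by
              simp [pvStepA, hsum, hs, hd]
            rw [h1, ih]
            simp [pvLastTokens?, hs, hd]
          · have h1 : pvStepA (d, v, true) l = (d, v, true) := by
              simp [pvStepA, hsum, hs, hv, hd]
            rw [h1, ih]
            simp [pvLastTokens?, hs, hv, hd]

lemma foldA_eq_alt (lines : List String) :
    (let st := lines.foldl pvStepA ([], [], false); ((st.1, st.2.1) : List String × List String))
      = match lines.findIdx? (fun l => PySem.Str.strip l == "SUMMARY") with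
        | none => ([], [])
        | some i =>
          let tail := (lines.drop (i + 1)).reverse
          (pvLastTokens "dependencies" tail, pvLastTokens "variants" tail) := by
  induction lines with
  | nil => rfl
  | cons l rest ih =>
    by_cases h : PySem.Str.strip l = "SUMMARY"
    · have hp : (fun l => PySem.Str.strip l == "SUMMARY") l = true := by simp [h]
      simp only [List.foldl, List.findIdx?_cons, hp, if_true]
      have h1 : pvStepA ([], [], false) l = ([], [], true) := by simp [pvStepA, h]
      rw [h1, foldA_true_eq_searches]
      simp [pvLastTokens_eq_opt]
    · have hp : (fun l => PySem.Str.strip l == "SUMMARY") l = false := by simp [h]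
      have h1 : pvStepA ([], [], false) l = ([], [], false) := by simp [pvStepA, h]
      simp only [List.foldl, List.findIdx?_cons, hp]
      rw [h1]
      cases hf : rest.findIdx? (fun l => PySem.Str.strip l == "SUMMARY") with
      | none => simpa [hf] using ih
      | some i => simpa [hf, List.drop_succ_cons] using ih

-- ===== VERDICT =====
theorem extract_distilled_cmake_spec : Claim_equal_extract_distilled_cmake := by
  intro distilled _
  unfold Spec_extract_distilled_cmake extract_distilled_cmake extract_distilled_cmake_alt
  exact foldA_eq_alt (PySem.Str.splitlines distilled)
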